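-- pv_equiv track=rewrite | github.com/Maryam0424/week-03 | T1_week_3.py | identify_cows
-- ===== SOURCE A (Python) =====
-- def identify_cows(yields):
--     best_yield = 0
--     best_cow = None
--     low_yield_cows = []
--     for cow_id, cow_data in yields.items():
--         total_yield = sum(sum(day_yield) for day_yield in cow_data.values())
--         if total_yield > best_yield:
--             best_yield = total_yield
--             best_cow = cow_id
--         low_days = sum(1 for day_yield in cow_data.values() if sum(day_yield) < 12)
--         if low_days >= 4:
--             low_yield_cows.append(cow_id)
--     return best_cow, low_yield_cows
-- ===== SOURCE B (Python) =====
-- def identify_cows(yields):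
--     totals = [(cow, sum(sum(day) for day in data.values()))
--               for cow, data in yields.items()]
--     best_cow = None
--     if totals:
--         best = max(t for _, t in totals)
--         if best > 0:
--             best_cow = next(c for c, t in totals if t == best)
--     low_yield_cows = [cow for cow, data in yields.items()
--                       if len([d for d in data.values() if sum(d) < 12]) >= 4]
--     return best_cow, low_yield_cows
-- ===== Notes on version B (the rewrite author's own statement) =====
-- stated objective: simpler
-- what changed: Replaces A's single running-max fold with state variables by a two-phase decomposition: build a list of per-cow totals, take its maximum and find the first cow attaining it (None unless the maximum is positive), and build the low-yield list as a separate comprehension.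
import Mathlib
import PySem

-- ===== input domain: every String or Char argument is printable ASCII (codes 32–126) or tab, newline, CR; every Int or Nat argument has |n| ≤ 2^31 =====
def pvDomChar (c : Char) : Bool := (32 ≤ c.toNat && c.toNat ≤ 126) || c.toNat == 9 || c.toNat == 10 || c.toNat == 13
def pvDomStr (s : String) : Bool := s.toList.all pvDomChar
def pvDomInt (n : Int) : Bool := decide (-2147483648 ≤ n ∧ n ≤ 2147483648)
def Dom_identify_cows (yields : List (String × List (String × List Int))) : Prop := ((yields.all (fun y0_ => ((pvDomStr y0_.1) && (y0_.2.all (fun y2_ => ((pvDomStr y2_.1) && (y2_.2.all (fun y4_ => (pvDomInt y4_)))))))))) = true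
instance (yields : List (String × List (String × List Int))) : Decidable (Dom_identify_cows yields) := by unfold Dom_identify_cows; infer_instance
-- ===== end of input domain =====

-- B replaces A's running-max fold over mutable state by a two-phase decomposition
-- (totals table, then max + first attainer, then a separate low-yield filter); objective: simpler.

-- ===== PORT A =====
-- total_yield = sum(sum(day_yield) for day_yield in cow_data.values())
def pvTotA (p : String × List (String × List Int)) : Int :=
  ((p.2.map Prod.snd).map List.sum).sum

-- low_days = sum(1 for day_yield in cow_data.values() if sum(day_yield) < 12)
def pvLowDaysA (p : String × List (String × List Int)) : Nat :=
  (p.2.map Prod.snd).countP (fun d => d.sum < 12)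

-- the loop body of A (state: best_yield, best_cow, low_yield_cows)
def pvStepA (st : Int × Option String × List String)
    (p : String × List (String × List Int)) : Int × Option String × List String :=
  let totalYield := pvTotA p
  let st1 := if totalYield > st.1 then (totalYield, some p.1, st.2.2) else st
  if pvLowDaysA p ≥ 4 then (st1.1, st1.2.1, st1.2.2 ++ [p.1]) else st1

def identify_cows (yields : List (String × List (String × List Int))) : Option String × List String :=
  let st := yields.foldl pvStepA (0, none, [])
  (st.2.1, st.2.2)

-- ===== PORT B =====
def identify_cows_alt (yields : List (String × List (String × List Int))) : Option String × List String :=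
  let totals := yields.map (fun p => (p.1, ((p.2.map Prod.snd).map List.sum).sum))
  let best_cow : Option String :=
    match PySem.List.max? (totals.map Prod.snd) (fun x => x) with
    | none => none
    | some best =>
        if best > 0 then (totals.find? (fun q => q.2 == best)).map Prod.fst else none
  let low_yield_cows :=
    (yields.filter (fun p =>
      ((p.2.map Prod.snd).filter (fun d => d.sum < 12)).length ≥ 4)).map Prod.fst
  (best_cow, low_yield_cows)

-- ===== PRECONDITION & SPEC =====
def Spec_identify_cows (yields : List (String × List (String × List Int))) (out : Option String × List String) : Prop := out = identify_cows_alt yields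
instance (yields : List (String × List (String × List Int))) (out : Option String × List String) : Decidable (Spec_identify_cows yields out) := by unfold Spec_identify_cows; infer_instance

-- ===== CLAIM (what is proved, stated in full; the proofs are below) =====
def Claim_equal_identify_cows : Prop := ∀ (yields : List (String × List (String × List Int))), Dom_identify_cows yields → Spec_identify_cows yields (identify_cows yields)

-- ===== LEMMAS AND PROOFS =====

-- A's fold characterised: running max of the totals, first cow attaining it, appended low list.
theorem foldA_eq (l : List (String × List (String × List Int)))
    (by_ : Int) (bc : Option String) (acc : List String) :
    l.foldl pvStepA (by_, bc, acc) =
      ((l.map pvTotA).foldl max by_,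
       (if by_ < (l.map pvTotA).foldl max by_ then
          (l.find? (fun p => pvTotA p == (l.map pvTotA).foldl max by_)).map Prod.fst
        else bc),
       acc ++ (l.filter (fun p => pvLowDaysA p ≥ 4)).map Prod.fst) := by
  induction l generalizing by_ bc acc with
  | nil => simp
  | cons p rest ih =>
    have hle : ∀ (a : Int) (ts : List Int), a ≤ ts.foldl max a := by
      intro a ts
      induction ts generalizing a with
      | nil => simp
      | cons t ts ih2 => exact le_trans (le_max_left a t) (ih2 (max a t))
    simp only [List.foldl_cons, List.map_cons, List.find?_cons, List.filter_cons]
    by_cases h : by_ < pvTotA p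
    · have hstep : pvStepA (by_, bc, acc) p =
        (if pvLowDaysA p ≥ 4 then (pvTotA p, some p.1, acc ++ [p.1])
         else (pvTotA p, some p.1, acc)) := by
        simp [pvStepA, h]
      rw [hstep]
      have hmax : max by_ (pvTotA p) = pvTotA p := max_eq_right h.le
      by_cases hl : pvLowDaysA p ≥ 4
      · simp only [if_pos hl]
        rw [ih]
        have hM := hle (pvTotA p) (rest.map pvTotA)
        rcases lt_or_eq_of_le hM with hlt | heq
        · have hby : by_ < (rest.map pvTotA).foldl max (pvTotA p) := lt_trans h hlt
          have hne : (pvTotA p == (rest.map pvTotA).foldl max (pvTotA p)) = false := by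
            simp [ne_of_lt hlt]
          simp [hmax, hlt, hby, hne, hl]
        · have hnlt : ¬ pvTotA p < (rest.map pvTotA).foldl max (pvTotA p) := by omega
          have hby : by_ < (rest.map pvTotA).foldl max (pvTotA p) := by omega
          have heq' : (pvTotA p == (rest.map pvTotA).foldl max (pvTotA p)) = true := by
            simp [← heq]
          simp [hmax, hnlt, hby, heq', hl]
      · simp only [if_neg hl]
        rw [ih]
        have hM := hle (pvTotA p) (rest.map pvTotA)
        rcases lt_or_eq_of_le hM with hlt | heq
        · have hby : by_ < (rest.map pvTotA).foldl max (pvTotA p) := lt_trans h hlt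
          have hne : (pvTotA p == (rest.map pvTotA).foldl max (pvTotA p)) = false := by
            simp [ne_of_lt hlt]
          simp [hmax, hlt, hby, hne, hl]
        · have hnlt : ¬ pvTotA p < (rest.map pvTotA).foldl max (pvTotA p) := by omega
          have hby : by_ < (rest.map pvTotA).foldl max (pvTotA p) := by omega
          have heq' : (pvTotA p == (rest.map pvTotA).foldl max (pvTotA p)) = true := by
            simp [← heq]
          simp [hmax, hnlt, hby, heq', hl]
    · have hstep : pvStepA (by_, bc, acc) p =
        (if pvLowDaysA p ≥ 4 then (by_, bc, acc ++ [p.1]) else (by_, bc, acc)) := by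
        simp [pvStepA, h]
      rw [hstep]
      have hmax : max by_ (pvTotA p) = by_ := max_eq_left (not_lt.mp h)
      have hbody : ∀ acc', List.foldl pvStepA (by_, bc, acc') rest =
          (List.foldl max by_ (rest.map pvTotA),
           (if by_ < List.foldl max by_ (rest.map pvTotA) then
              (rest.find? (fun q => pvTotA q == List.foldl max by_ (rest.map pvTotA))).map Prod.fst
            else bc),
           acc' ++ (rest.filter (fun q => pvLowDaysA q ≥ 4)).map Prod.fst) := by
        intro acc'; exact ih by_ bc acc'
      by_cases hl : pvLowDaysA p ≥ 4
      · rw [if_pos hl, hbody]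
        by_cases hby : by_ < (rest.map pvTotA).foldl max by_
        · have hne : (pvTotA p == (rest.map pvTotA).foldl max by_) = false := by
            have : pvTotA p ≤ by_ := not_lt.mp h
            simp; omega
          simp [hmax, hby, hne, hl]
        · simp [hmax, hby, hl]
      · rw [if_neg hl, hbody]
        by_cases hby : by_ < (rest.map pvTotA).foldl max by_
        · have hne : (pvTotA p == (rest.map pvTotA).foldl max by_) = false := by
            have : pvTotA p ≤ by_ := not_lt.mp h
            simp; omega
          simp [hmax, hby, hne, hl]
        · simp [hmax, hby, hl]

-- foldl max from a combined start value
theorem foldl_max_max (l : List Int) (a b : Int) :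
    l.foldl max (max a b) = max a (l.foldl max b) := by
  induction l generalizing b with
  | nil => rfl
  | cons c t ih => simpa [max_assoc] using ih (max b c)

-- ===== VERDICT (by name: the statement is the Claim_ definition above) =====
theorem identify_cows_spec : Claim_equal_identify_cows := by
  intro yields _
  unfold Spec_identify_cows identify_cows identify_cows_alt
  rw [foldA_eq]
  simp only [List.map_map, List.nil_append]
  have hfun : (fun p : String × List (String × List Int) =>
      (p.1, (List.map (List.sum ∘ Prod.snd) p.2).sum)) = (fun p => (p.1, pvTotA p)) := by
    funext p; simp [pvTotA, List.map_map]
  rw [hfun]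
  cases yields with
  | nil => simp [PySem.List.max?]
  | cons p rest =>
    have hmap : (Prod.snd ∘ fun p : String × List (String × List Int) => (p.1, pvTotA p))
        = pvTotA := by funext q; rfl
    rw [hmap]
    have hm : PySem.List.max? ((p :: rest).map pvTotA) (fun x => x)
        = some ((rest.map pvTotA).foldl max (pvTotA p)) := by
      rw [List.map_cons]
      exact PySem.List.max?_id_cons (x := pvTotA p) (t := rest.map pvTotA)
    rw [hm]
    set M0 := (rest.map pvTotA).foldl max (pvTotA p) with hM0
    have hM : ((p :: rest).map pvTotA).foldl max 0 = max 0 M0 := by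
      rw [List.map_cons, List.foldl_cons]
      exact foldl_max_max (rest.map pvTotA) 0 (pvTotA p)
    rw [hM]
    have hlow : ((p :: rest).filter (fun q => pvLowDaysA q ≥ 4)).map Prod.fst
        = ((p :: rest).filter (fun q =>
            ((q.2.map Prod.snd).filter (fun d => d.sum < 12)).length ≥ 4)).map Prod.fst := by
      simp [pvLowDaysA, List.countP_eq_length_filter]
    by_cases hpos : M0 > 0
    · have h2 : max (0:Int) M0 = M0 := max_eq_right hpos.le
      have hfind : (((p :: rest).map (fun p => (p.1, pvTotA p))).find? (fun q => q.2 == M0)).map Prod.fst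
          = ((p :: rest).find? (fun q => pvTotA q == M0)).map Prod.fst := by
        rw [List.find?_map]
        cases h : (p :: rest).find? ((fun q => q.2 == M0) ∘ fun p => (p.1, pvTotA p)) with
        | none =>
          have : (p :: rest).find? (fun q => pvTotA q == M0) = none := h
          simp [this]
        | some q =>
          have : (p :: rest).find? (fun q => pvTotA q == M0) = some q := h
          simp [this]
      simp only [h2, hfind, hlow]
    · have h2 : max (0:Int) M0 = 0 := max_eq_left (by omega)
      simp [h2, hlow, hpos]
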